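-- pv_equiv track=rewrite | github.com/atchesonUSC/sympl | CheckLogic.py | equalNumIfEnd
-- ===== SOURCE A (Python) =====
-- def equalNumIfEnd(ip_data):
--     equal = False
--     endCounter = 0
--     statementCounter = 0
--     statements = ['if','for']
--     for logic in ip_data:
--         if logic in statements:
--             statementCounter += 1
--         elif logic == 'end':
--             endCounter += 1
--     if endCounter == statementCounter:
--         equal = True
--     return equal
-- ===== SOURCE B (Python) =====
-- from itertools import zip_longest
--
-- def equalNumIfEnd(ip_data):
--     # Pair each 'if'/'for' token with an 'end' token in lockstep; the counts
--     # are equal exactly when the pairing is perfect (no side is left over).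
--     openers = (tok for tok in ip_data if tok in ('if', 'for'))
--     closers = (tok for tok in ip_data if tok == 'end')
--     return all(o is not None and e is not None
--                for o, e in zip_longest(openers, closers))
-- ===== Notes on version B (the rewrite author's own statement) =====
-- stated objective: alternative
-- what changed: Replaces A's branched counter loop with a pairing algorithm: the 'if'/'for' stream and the 'end' stream are zipped in lockstep with zip_longest and the result is whether the pairing is perfect, so no counters or arithmetic appear at all.
import Mathlib
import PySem

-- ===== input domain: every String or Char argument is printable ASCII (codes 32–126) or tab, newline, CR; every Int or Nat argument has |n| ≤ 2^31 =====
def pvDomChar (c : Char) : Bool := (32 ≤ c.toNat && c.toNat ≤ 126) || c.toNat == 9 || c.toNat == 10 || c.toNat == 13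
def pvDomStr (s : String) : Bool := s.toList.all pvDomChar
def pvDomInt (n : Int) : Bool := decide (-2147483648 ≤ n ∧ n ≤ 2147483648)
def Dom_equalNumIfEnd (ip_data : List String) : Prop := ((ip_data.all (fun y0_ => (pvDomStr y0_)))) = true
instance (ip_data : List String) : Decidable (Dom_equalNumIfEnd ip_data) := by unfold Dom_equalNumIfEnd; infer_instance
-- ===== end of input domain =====

-- B replaces A's counter loop with a pairing algorithm: zip the 'if'/'for' stream with the
-- 'end' stream in lockstep and test whether the pairing is perfect (alternative; same cost).
-- ===== PORT A =====
def equalNumIfEnd (ip_data : List String) : Bool :=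
  -- equal = False; endCounter = 0; statementCounter = 0; state = (statementCounter, endCounter)
  let statements : List String := ["if", "for"]
  let st := ip_data.foldl (fun (st : Int × Int) logic =>
    if logic ∈ statements then (st.1 + 1, st.2)
    else if logic == "end" then (st.1, st.2 + 1)
    else st) (0, 0)
  if st.2 == st.1 then true else false

-- ===== PORT B =====
-- zip_longest(openers, closers) with the all(... is not None ...) check: walk the two
-- filtered streams in lockstep; False as soon as one stream is exhausted before the other.
def pvPairedUp : List String → List String → Bool
  | [], [] => true
  | _ :: os, _ :: es => pvPairedUp os es
  | _, _ => false

def equalNumIfEnd_alt (ip_data : List String) : Bool :=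
  let openers := ip_data.filter (fun tok => tok ∈ (["if", "for"] : List String))
  let closers := ip_data.filter (fun tok => tok == "end")
  pvPairedUp openers closers

-- ===== PRECONDITION & SPEC =====
def Spec_equalNumIfEnd (ip_data : List String) (out : Bool) : Prop := out = equalNumIfEnd_alt ip_data
instance (ip_data : List String) (out : Bool) : Decidable (Spec_equalNumIfEnd ip_data out) := by unfold Spec_equalNumIfEnd; infer_instance

-- ===== CLAIM (what is proved, stated in full; the proofs are below) =====
def Claim_equal_equalNumIfEnd : Prop := ∀ (ip_data : List String), Dom_equalNumIfEnd ip_data → Spec_equalNumIfEnd ip_data (equalNumIfEnd ip_data)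

-- ===== LEMMAS AND PROOFS =====

-- A's fold computes the two counts.
theorem pvA_loop (ip_data : List String) (a b : Int) :
    ip_data.foldl (fun (st : Int × Int) logic =>
      if logic ∈ (["if", "for"] : List String) then (st.1 + 1, st.2)
      else if logic == "end" then (st.1, st.2 + 1)
      else st) (a, b)
    = (a + ip_data.count "if" + ip_data.count "for", b + ip_data.count "end") := by
  induction ip_data generalizing a b with
  | nil => simp
  | cons x xs ih =>
    rw [List.foldl_cons]
    by_cases h1 : x = "if"
    · subst h1
      rw [show (if ("if" : String) ∈ (["if", "for"] : List String) then ((a : Int) + 1, b)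
            else if ("if" : String) == "end" then (a, b + 1) else (a, b)) = (a + 1, b) from by simp]
      rw [ih]; simp; ring
    · by_cases h2 : x = "for"
      · subst h2
        rw [show (if ("for" : String) ∈ (["if", "for"] : List String) then ((a : Int) + 1, b)
              else if ("for" : String) == "end" then (a, b + 1) else (a, b)) = (a + 1, b) from by simp]
        rw [ih]; simp [h1]; ring
      · by_cases h3 : x = "end"
        · subst h3
          rw [show (if ("end" : String) ∈ (["if", "for"] : List String) then ((a : Int) + 1, b)
                else if ("end" : String) == "end" then (a, b + 1) else (a, b)) = (a, b + 1) from by simp]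
          rw [ih]; simp [h1, h2]; ring
        · have hx : (if x ∈ (["if", "for"] : List String) then ((a : Int) + 1, b)
              else if x == "end" then (a, b + 1) else (a, b)) = (a, b) := by
            simp [h1, h2, h3]
          rw [hx, ih]; simp [h1, h2, h3]

-- The lockstep pairing succeeds exactly when the two lists have equal length.
theorem pvPairedUp_iff_length (xs ys : List String) :
    pvPairedUp xs ys = (xs.length == ys.length) := by
  induction xs generalizing ys with
  | nil => cases ys <;> simp [pvPairedUp]
  | cons x xs ih => cases ys <;> simp [pvPairedUp, ih]

-- Length of the openers filter = count "if" + count "for".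
theorem pvOpeners_length (ip_data : List String) :
    (ip_data.filter (fun tok => tok ∈ (["if", "for"] : List String))).length
      = ip_data.count "if" + ip_data.count "for" := by
  induction ip_data with
  | nil => simp
  | cons x xs ih =>
    by_cases h1 : x = "if" <;> by_cases h2 : x = "for" <;>
      simp_all <;> omega

-- ===== VERDICT (by name: the statement is the Claim_ definition above) =====
theorem equalNumIfEnd_spec : Claim_equal_equalNumIfEnd := by
  intro ip_data _
  unfold Spec_equalNumIfEnd equalNumIfEnd equalNumIfEnd_alt
  simp only [pvA_loop, pvPairedUp_iff_length, pvOpeners_length, zero_add]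
  have hc : (ip_data.filter (fun tok => tok == "end")).length = ip_data.count "end" := by
    simp [List.count_eq_length_filter]
  rw [hc]
  by_cases h : ip_data.count "end" = ip_data.count "if" + ip_data.count "for"
  · simp [h]
  · simp only [beq_iff_eq]
    rw [if_neg (by exact_mod_cast fun hi => h (by exact_mod_cast hi))]
    simp [Ne.symm h]
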